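-- pv_equiv track=rewrite | github.com/nikdim03/LinkedInTelegramBot | src/job_posts/job_post_sender.py | get_unclosed_tag
-- ===== SOURCE A (Python) =====
-- def get_unclosed_tag(text: str) -> list:
--     tags = ["```", "`", "*", "_"]
--     stack = []
--     i = 0
--     while i < len(text):
--         if text[i] == '\\' and not stack:
--             i += 2
--             continue
--
--         if stack:
--             is_i_inceremented = False
--             current_tag = stack[-1]
--             if text.startswith(current_tag, i):
--                 is_i_inceremented = True
--                 i += len(current_tag)
--                 stack.pop()
--                 continue
--         else:
--             is_i_inceremented = False
--             for tag in tags: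
--                 if text.startswith(tag, i):
--                     stack.append(tag)
--                     is_i_inceremented = True
--                     i += len(tag)
--                     break
--         if not is_i_inceremented:
--             i += 1
--     return stack
-- ===== SOURCE B (Python) =====
-- def get_unclosed_tag(text: str) -> list:
--     # No stack: the scanner is always "outside" a tag; on an opening tag,
--     # jump straight to its closing occurrence with str.find.
--     i = 0
--     n = len(text)
--     while i < n:
--         if text[i] == '\\':
--             i += 2
--             continue
--         tag = ("```" if text.startswith("```", i) else
--                "`" if text.startswith("`", i) else
--                "*" if text.startswith("*", i) else
--                "_" if text.startswith("_", i) else None)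
--         if tag is None:
--             i += 1
--             continue
--         close = text.find(tag, i + len(tag))
--         if close == -1:
--             return [tag]
--         i = close + len(tag)
--     return []
-- ===== Notes on version B (the rewrite author's own statement) =====
-- stated objective: simpler
-- what changed: B drops A's stack and its character-by-character scan inside a tag: it keeps a single outside-a-tag index and jumps from each opening tag directly to its closing occurrence with str.find.
import Mathlib
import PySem

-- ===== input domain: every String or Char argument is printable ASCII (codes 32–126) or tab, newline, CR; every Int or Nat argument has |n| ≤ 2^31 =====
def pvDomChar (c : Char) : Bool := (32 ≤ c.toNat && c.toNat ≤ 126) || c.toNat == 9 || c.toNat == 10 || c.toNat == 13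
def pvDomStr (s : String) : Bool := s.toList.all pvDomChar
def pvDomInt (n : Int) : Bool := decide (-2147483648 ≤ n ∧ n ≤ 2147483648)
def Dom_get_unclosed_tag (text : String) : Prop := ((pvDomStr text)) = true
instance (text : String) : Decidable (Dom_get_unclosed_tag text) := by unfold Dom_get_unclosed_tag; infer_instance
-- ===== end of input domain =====

-- B replaces A's stack-and-char-by-char scan by a stackless scanner that jumps
-- straight from an opening tag to its closing occurrence (str.find); simpler, no speed claim proved.

-- ===== PORT A =====
-- text.startswith(tag, i)  (exact for 0 ≤ i: slice comparison)
def pvStarts (tag : List Char) (l : List Char) (i : Nat) : Bool :=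
  tag.isPrefixOf (l.drop i)

-- the while loop of A: state = (stack, i)
def goA (l : List Char) (stack : List String) (i : Nat) : List String :=
  if h : i < l.length then
    if l[i] = '\\' ∧ stack = [] then
      goA l stack (i + 2)
    else
      match stack with
      | current :: rest =>
        if pvStarts current.toList l i then
          goA l rest (i + current.toList.length)
        else
          goA l stack (i + 1)
      | [] =>
        match hf : ["```", "`", "*", "_"].find? (fun tag => pvStarts tag.toList l i) with
        | some tag => goA l (tag :: stack) (i + tag.toList.length)
        | none => goA l stack (i + 1)
  else stack
termination_by (l.length - i, stack.length)
decreasing_by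
  · simp [Prod.lex_iff]; omega
  · simp [Prod.lex_iff]; omega
  · simp [Prod.lex_iff]; omega
  · have hm := List.mem_of_find?_eq_some hf
    fin_cases hm <;> simp [Prod.lex_iff] <;> omega
  · simp [Prod.lex_iff]; omega

def get_unclosed_tag (text : String) : List String :=
  goA text.toList [] 0

-- ===== PORT B =====
-- text.find(tag, j)  (exact for nonempty tag and 0 ≤ j)
def pyFindFrom (l : List Char) (tag : List Char) (j : Nat) : Option Nat :=
  if h : j < l.length then
    if tag.isPrefixOf (l.drop j) then some j else pyFindFrom l tag (j + 1)
  else none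
termination_by l.length - j

-- the conditional-expression chain picking the tag that opens at i
def openTag (l : List Char) (i : Nat) : Option String :=
  if pvStarts "```".toList l i then some "```"
  else if pvStarts "`".toList l i then some "`"
  else if pvStarts "*".toList l i then some "*"
  else if pvStarts "_".toList l i then some "_"
  else none

theorem openTag_some_len {l : List Char} {i : Nat} {t : String}
    (h : openTag l i = some t) : 1 ≤ t.toList.length := by
  unfold openTag at h
  split_ifs at h <;> (cases h; decide)

theorem pyFindFrom_some_ge {l tag : List Char} {j c : Nat}
    (h : pyFindFrom l tag j = some c) : j ≤ c ∧ c < l.length := by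
  fun_induction pyFindFrom l tag j with
  | case1 j hj hp => simp at h; omega
  | case2 j hj hp ih => have := ih h; omega
  | case3 j hj => simp at h

-- the while loop of B: state = i only
def goB (l : List Char) (i : Nat) : List String :=
  if h : i < l.length then
    if l[i] = '\\' then
      goB l (i + 2)
    else
      match ht : openTag l i with
      | none => goB l (i + 1)
      | some t =>
        match hf : pyFindFrom l t.toList (i + t.toList.length) with
        | none => [t]
        | some close => goB l (close + t.toList.length)
  else []
termination_by l.length - i
decreasing_by
  · omega
  · omega
  · have h1 := openTag_some_len ht
    have h2 := pyFindFrom_some_ge hf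
    omega

def get_unclosed_tag_alt (text : String) : List String :=
  goB text.toList 0

-- ===== PRECONDITION & SPEC =====
def Spec_get_unclosed_tag (text : String) (out : List String) : Prop := out = get_unclosed_tag_alt text
instance (text : String) (out : List String) : Decidable (Spec_get_unclosed_tag text out) := by unfold Spec_get_unclosed_tag; infer_instance

-- ===== CLAIM (what is proved, stated in full; the proofs are below) =====
def Claim_equal_get_unclosed_tag : Prop := ∀ (text : String), Dom_get_unclosed_tag text → Spec_get_unclosed_tag text (get_unclosed_tag text)

-- ===== LEMMAS AND PROOFS =====

-- A's find? over the tag list is B's conditional chain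
theorem find?_eq_openTag (l : List Char) (i : Nat) :
    ["```", "`", "*", "_"].find? (fun tag => pvStarts tag.toList l i) = openTag l i := by
  simp [List.find?, openTag]
  split_ifs <;> simp_all

-- inside a tag, A's char-by-char scan is exactly pyFindFrom
theorem goA_inside (l : List Char) (t : String) (i : Nat) :
    goA l [t] i =
      match pyFindFrom l t.toList i with
      | none => [t]
      | some c => goA l [] (c + t.toList.length) := by
  fun_induction pyFindFrom l t.toList i with
  | case1 j hj hp =>
    rw [goA]
    simp [hj, pvStarts, hp]
  | case2 j hj hp ih =>
    rw [goA]
    simp [hj, pvStarts, hp, ih]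
  | case3 j hj =>
    rw [goA]
    simp [hj]

theorem goA_eq_goB (l : List Char) (i : Nat) : goA l [] i = goB l i := by
  fun_induction goB l i with
  | case1 j hj ih =>
    rw [goA]
    simp_all
  | case2 j hj hesc ht ih =>
    rw [goA, dif_pos hj, if_neg (by simp [hesc])]
    split
    · next tag h => rw [find?_eq_openTag, ht] at h; cases h
    · exact ih
  | case3 j hj hesc t ht hf =>
    rw [goA, dif_pos hj, if_neg (by simp [hesc])]
    split
    · next tag h =>
        rw [find?_eq_openTag, ht] at h
        injection h with h2; subst h2
        rw [goA_inside]; simp only [String.length_toList] at hf; simp [hf]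
    · next h => rw [find?_eq_openTag, ht] at h; cases h
  | case4 j hj hesc t ht close hf ih =>
    rw [goA, dif_pos hj, if_neg (by simp [hesc])]
    split
    · next tag h =>
        rw [find?_eq_openTag, ht] at h
        injection h with h2; subst h2
        rw [goA_inside]; simp only [String.length_toList] at hf ih; simp [hf, ih]
    · next h => rw [find?_eq_openTag, ht] at h; cases h
  | case5 j hj =>
    rw [goA]
    simp [hj]

-- ===== VERDICT (by name: the statement is the Claim_ definition above) =====
theorem get_unclosed_tag_spec : Claim_equal_get_unclosed_tag := by
  intro text _
  unfold Spec_get_unclosed_tag get_unclosed_tag get_unclosed_tag_alt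
  exact goA_eq_goB text.toList 0
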